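-- pv_equiv track=rewrite | github.com/pspealman/CVish | cvish.py | parse_msa_kmer
-- ===== SOURCE A (Python) =====
-- def parse_msa_kmer(seq_1, seq_2):
--     '''
--     Parameters
--     ----------
--     seq_1 : string
--         query string aligned
--     seq_2 : string
--         source string aligned
--
--     Returns
--     -------
--     mismatch_ct: int representing mismatch between two sequences
--     match_ct : int representing match
--
--     '''
--     match_ct = 0
--     mismatch_ct = 0
--     phase = 0
--     for each in range(len(seq_1)):
--
--         if phase == 0:
--             if ((seq_1[each] != '-') and (seq_2[each] != '-')):
--                 phase = 1
--
--         if phase == 1: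
--             if (len(seq_1[each:]) == seq_1[each:].count('-')) or (len(seq_2[each:]) == seq_2[each:].count('-')):
--                 phase = 2
--
--             else:
--                 if (seq_1[each] != seq_2[each]):
--                     mismatch_ct += 1
--                 else:
--                     match_ct += 1
--
--     return(mismatch_ct, match_ct)
-- ===== SOURCE B (Python) =====
-- def _trimmed_len(s):
--     # length of s with trailing '-' removed
--     n = len(s)
--     while n > 0 and s[n - 1] == '-':
--         n -= 1
--     return n
--
--
-- def parse_msa_kmer(seq_1, seq_2):
--     pairs = list(zip(seq_1, seq_2))
--     start = next((i for i, (a, b) in enumerate(pairs) if a != '-' and b != '-'), None)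
--     if start is None:
--         return (0, 0)
--     end = min(_trimmed_len(seq_1), _trimmed_len(seq_2))
--     mismatch = sum(1 for a, b in pairs[start:end] if a != b)
--     return (mismatch, (end - start) - mismatch)
-- ===== Notes on version B (the rewrite author's own statement) =====
-- stated objective: faster
-- what changed: A rescans both remaining suffixes at every index to detect the all-gap tail (quadratic); B finds the start index once over the zipped pair, precomputes each sequence's length without trailing '-' to get the end of the counted window in closed form, and counts mismatches in a single pass over that window.
import Mathlib
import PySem

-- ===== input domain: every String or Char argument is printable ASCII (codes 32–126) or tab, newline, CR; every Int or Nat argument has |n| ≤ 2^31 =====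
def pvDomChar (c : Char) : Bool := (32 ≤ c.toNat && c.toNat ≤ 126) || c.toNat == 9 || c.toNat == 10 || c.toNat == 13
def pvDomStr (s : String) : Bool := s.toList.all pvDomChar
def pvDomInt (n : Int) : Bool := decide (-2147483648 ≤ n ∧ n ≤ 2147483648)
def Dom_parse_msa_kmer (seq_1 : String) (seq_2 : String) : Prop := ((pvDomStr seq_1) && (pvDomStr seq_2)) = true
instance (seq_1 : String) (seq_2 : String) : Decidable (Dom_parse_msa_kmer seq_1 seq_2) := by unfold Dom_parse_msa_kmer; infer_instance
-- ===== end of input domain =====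

-- B is a linear-time re-implementation of A (A rescans both suffixes at every index);
-- equivalence of the RETURN value is proved on all inputs where the Python A returns (Pre_).

-- ===== PORT A =====
-- loop body of A's 'for each in range(len(seq_1))', state = (match_ct, mismatch_ct, phase)
def pvStepA (s1 s2 : List Char) (st : Int × Int × Int) (each : Int) : Int × Int × Int :=
  let match_ct := st.1
  let mismatch_ct := st.2.1
  let phase0 := st.2.2
  let phase :=
    if phase0 = 0 then
      if PySem.List.pyGetD s1 each '-' ≠ '-' ∧ PySem.List.pyGetD s2 each '-' ≠ '-' then 1 else phase0
    else phase0
  if phase = 1 then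
    let r1 := PySem.List.slice s1 (some each) none
    let r2 := PySem.List.slice s2 (some each) none
    if r1.length = r1.count '-' ∨ r2.length = r2.count '-' then
      (match_ct, mismatch_ct, 2)
    else
      if PySem.List.pyGetD s1 each '-' ≠ PySem.List.pyGetD s2 each '-' then
        (match_ct, mismatch_ct + 1, 1)
      else
        (match_ct + 1, mismatch_ct, 1)
  else
    (match_ct, mismatch_ct, phase)

def parse_msa_kmer (seq_1 : String) (seq_2 : String) : List Int :=
  let s1 := seq_1.toList
  let s2 := seq_2.toList
  let fin := (PySem.List.pyRange 0 (s1.length : Int) 1).foldl (pvStepA s1 s2) (0, 0, 0)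
  [fin.2.1, fin.1]

-- ===== PORT B =====
-- port of Source B's _trimmed_len: while n > 0 and s[n-1] == '-': n -= 1
def pvTrimmedLen (s : List Char) : Nat → Nat
  | 0 => 0
  | m + 1 => if s.getD m ' ' = '-' then pvTrimmedLen s m else m + 1

def parse_msa_kmer_alt (seq_1 : String) (seq_2 : String) : List Int :=
  let s1 := seq_1.toList
  let s2 := seq_2.toList
  let pairs := s1.zip s2
  match pairs.findIdx? (fun p => p.1 != '-' && p.2 != '-') with
  | none => [0, 0]
  | some start =>
    let e := min (pvTrimmedLen s1 s1.length) (pvTrimmedLen s2 s2.length)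
    let window := (pairs.drop start).take (e - start)
    let mismatch := window.countP (fun p => p.1 != p.2)
    [(mismatch : Int), ((e - start : Nat) : Int) - (mismatch : Int)]

-- ===== PRECONDITION & SPEC =====
-- Pre_ excludes exactly the inputs where A raises IndexError: seq_1 has a non-'-' character at
-- an index ≥ len(seq_2) reached while still in phase 0 (i.e. before any index where both are non-'-').
def Pre_parse_msa_kmer (seq_1 : String) (seq_2 : String) : Prop :=
  (∃ i < seq_1.toList.length, seq_2.toList.length ≤ i ∧ seq_1.toList.getD i ' ' ≠ '-') →
  (∃ j < min seq_1.toList.length seq_2.toList.length,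
      seq_1.toList.getD j ' ' ≠ '-' ∧ seq_2.toList.getD j ' ' ≠ '-')
instance (seq_1 : String) (seq_2 : String) : Decidable (Pre_parse_msa_kmer seq_1 seq_2) := by
  unfold Pre_parse_msa_kmer; infer_instance

def pvWitness_parse_msa_kmer : String × String := ("A-C", "AGC")

def Spec_parse_msa_kmer (seq_1 : String) (seq_2 : String) (out : List Int) : Prop :=
  out = parse_msa_kmer_alt seq_1 seq_2
instance (seq_1 : String) (seq_2 : String) (out : List Int) : Decidable (Spec_parse_msa_kmer seq_1 seq_2 out) := by
  unfold Spec_parse_msa_kmer; infer_instance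

-- ===== CLAIM (what is proved, stated in full; the proofs are below) =====
def Claim_equal_parse_msa_kmer : Prop := ∀ (seq_1 : String) (seq_2 : String), Dom_parse_msa_kmer seq_1 seq_2 → Pre_parse_msa_kmer seq_1 seq_2 → Spec_parse_msa_kmer seq_1 seq_2 (parse_msa_kmer seq_1 seq_2)


-- ===== LEMMAS AND PROOFS =====

-- mismatch / match counts of the window [i, e) of the zipped sequences
def pvMis (cs1 cs2 : List Char) (i e : Nat) : Nat :=
  (((cs1.zip cs2).drop i).take (e - i)).countP (fun p => p.1 != p.2)
def pvMat (cs1 cs2 : List Char) (i e : Nat) : Nat :=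
  (((cs1.zip cs2).drop i).take (e - i)).countP (fun p => p.1 == p.2)

lemma pvTrim_le (cs : List Char) : ∀ n, pvTrimmedLen cs n ≤ n := by
  intro n; induction n with
  | zero => simp [pvTrimmedLen]
  | succ m ih => simp only [pvTrimmedLen]; split <;> omega

lemma pvTrim_dash (cs : List Char) : ∀ n k, pvTrimmedLen cs n ≤ k → k < n → cs.getD k ' ' = '-' := by
  intro n; induction n with
  | zero => intro k h1 h2; omega
  | succ m ih =>
    intro k h1 h2
    by_cases hd : cs.getD m ' ' = '-'
    · rcases Nat.lt_or_ge k m with hk | hk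
      · exact ih k (by rwa [pvTrimmedLen, if_pos hd] at h1) hk
      · have : k = m := by omega
        simpa [this] using hd
    · simp only [pvTrimmedLen, if_neg hd] at h1; omega

lemma pvTrim_last (cs : List Char) : ∀ n m, pvTrimmedLen cs n = m + 1 → cs.getD m ' ' ≠ '-' ∧ m < n := by
  intro n; induction n with
  | zero => intro m h; simp [pvTrimmedLen] at h
  | succ m' ih =>
    intro m h
    by_cases hd : cs.getD m' ' ' = '-'
    · simp only [pvTrimmedLen, if_pos hd] at h
      obtain ⟨h1, h2⟩ := ih m h
      exact ⟨h1, by omega⟩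
    · simp only [pvTrimmedLen, if_neg hd] at h
      have : m = m' := by omega
      exact ⟨this ▸ hd, by omega⟩

-- "suffix from j is all dashes"  ↔  trimmed length ≤ j
lemma pvAllDash_of_trim_le (cs : List Char) (j : Nat) (h : pvTrimmedLen cs cs.length ≤ j) :
    (cs.drop j).length = (cs.drop j).count '-' := by
  refine ((List.count_eq_length.mpr ?_)).symm
  intro b hb
  obtain ⟨i, hi, rfl⟩ := List.getElem_of_mem hb |>.imp (fun i h => h)
  rw [List.getElem_drop]
  have hlen : j + i < cs.length := by
    have := hi; simp [List.length_drop] at this; omega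
  rw [← List.getD_eq_getElem cs ' ' hlen]
  exact (pvTrim_dash cs cs.length (j + i) (by omega) hlen).symm

lemma pvTrim_le_of_allDash (cs : List Char) (j : Nat)
    (h : (cs.drop j).length = (cs.drop j).count '-') :
    pvTrimmedLen cs cs.length ≤ j := by
  by_contra hj
  rw [not_le] at hj
  obtain ⟨m, hm⟩ : ∃ m, pvTrimmedLen cs cs.length = m + 1 := ⟨pvTrimmedLen cs cs.length - 1, by omega⟩
  obtain ⟨hne, hmlt⟩ := pvTrim_last cs cs.length m hm
  have hjm : j ≤ m := by omega
  have hidx : m - j < (cs.drop j).length := by simp [List.length_drop]; omega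
  have hmem : (cs.drop j)[m - j] ∈ cs.drop j := List.getElem_mem hidx
  have hall := List.count_eq_length.mp h.symm _ hmem
  rw [List.getElem_drop] at hall
  have hall2 : '-' = cs.getD m ' ' := by
    rw [List.getD_eq_getElem cs ' ' (show m < cs.length by omega)]
    simpa [Nat.add_sub_cancel' hjm] using hall
  exact hne hall2.symm

lemma pvRunPhase2 (cs1 cs2 : List Char) :
    ∀ (l : List Int) (m mm : Int), l.foldl (pvStepA cs1 cs2) (m, mm, 2) = (m, mm, 2) := by
  intro l
  induction l with
  | nil => intro m mm; rfl
  | cons x xs ih =>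
    intro m mm
    have hstep : pvStepA cs1 cs2 (m, mm, 2) x = (m, mm, 2) := by
      simp [pvStepA]
    simp only [List.foldl_cons, hstep, ih]

lemma pvRunIdle (cs1 cs2 : List Char) :
    ∀ (l : List Int),
      (∀ j ∈ l, ¬(PySem.List.pyGetD cs1 j '-' ≠ '-' ∧ PySem.List.pyGetD cs2 j '-' ≠ '-')) →
      l.foldl (pvStepA cs1 cs2) (0, 0, 0) = (0, 0, 0) := by
  intro l
  induction l with
  | nil => intro _; rfl
  | cons x xs ih =>
    intro h
    have hstep : pvStepA cs1 cs2 (0, 0, 0) x = (0, 0, 0) := by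
      simp [pvStepA, h x (by simp)]
    simp only [List.foldl_cons, hstep]
    exact ih (fun j hj => h j (by simp [hj]))

lemma pvWindow_cons (cs1 cs2 : List Char) (i e : Nat) (hin : i < e)
    (h1 : i < cs1.length) (h2 : i < cs2.length) :
    ((cs1.zip cs2).drop i).take (e - i)
      = (cs1[i], cs2[i]) :: (((cs1.zip cs2).drop (i + 1)).take (e - (i + 1))) := by
  have hzl : i < (cs1.zip cs2).length := by simp [List.length_zip]; omega
  rw [List.drop_eq_getElem_cons hzl]
  have hsub : e - i = (e - (i + 1)) + 1 := by omega
  rw [hsub, List.take_succ_cons, List.getElem_zip]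

lemma pvSlice_drop (cs : List Char) (i : Nat) :
    PySem.List.slice cs (some (i : Int)) none = cs.drop i := by
  rw [PySem.List.slice_from _ (by positivity)]; simp

lemma pvGet_elem (cs : List Char) (i : Nat) (h : i < cs.length) :
    PySem.List.pyGetD cs (i : Int) '-' = cs[i] := by
  simp [PySem.List.pyGetD_natCast]
  exact List.getD_eq_getElem _ _ h

-- the main phase-1 run
lemma pvRunPhase1 (cs1 cs2 : List Char) (e : Nat)
    (he : e = min (pvTrimmedLen cs1 cs1.length) (pvTrimmedLen cs2 cs2.length)) :
    ∀ (k i : Nat) (m mm : Int), i ≤ e → e - i = k →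
      (PySem.List.pyRange (i : Int) (cs1.length : Int) 1).foldl (pvStepA cs1 cs2) (m, mm, 1)
        = (m + (pvMat cs1 cs2 i e : Int), mm + (pvMis cs1 cs2 i e : Int),
           if e = cs1.length then 1 else 2) := by
  intro k
  induction k with
  | zero =>
    intro i m mm hie hk
    have hei : i = e := by omega
    subst hei
    have ht1 : pvTrimmedLen cs1 cs1.length ≤ cs1.length := pvTrim_le _ _
    have ht2 : pvTrimmedLen cs2 cs2.length ≤ cs2.length := pvTrim_le _ _
    have hee : i ≤ cs1.length := by omega
    rcases eq_or_lt_of_le hee with heq | hlt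
    · rw [if_pos heq]
      rw [PySem.List.pyRange_one_eq_nil (by exact_mod_cast Nat.le_of_eq heq.symm)]
      simp [pvMis, pvMat]
    · rw [if_neg (by omega)]
      rw [PySem.List.pyRange_one_cons (by exact_mod_cast hlt)]
      have hdisj : (cs1.drop i).length = (cs1.drop i).count '-' ∨
          (cs2.drop i).length = (cs2.drop i).count '-' := by
        have : pvTrimmedLen cs1 cs1.length ≤ i ∨ pvTrimmedLen cs2 cs2.length ≤ i := by omega
        exact this.imp (pvAllDash_of_trim_le cs1 i) (pvAllDash_of_trim_le cs2 i)
      have hstep : pvStepA cs1 cs2 (m, mm, 1) (i : Int) = (m, mm, 2) := by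
        simp only [pvStepA, pvSlice_drop]
        norm_num
        intro hA hB
        rcases hdisj with h | h
        · exact absurd (by simpa [List.length_drop] using h) hA
        · exact absurd (by simpa [List.length_drop] using h) hB
      rw [List.foldl_cons, hstep, pvRunPhase2]
      simp [pvMis, pvMat]
  | succ k ih =>
    intro i m mm hie hk
    have hin : i < e := by omega
    have ht1 : pvTrimmedLen cs1 cs1.length ≤ cs1.length := pvTrim_le _ _
    have ht2 : pvTrimmedLen cs2 cs2.length ≤ cs2.length := pvTrim_le _ _
    have hi1 : i < cs1.length := by omega
    have hi2 : i < cs2.length := by omega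
    rw [PySem.List.pyRange_one_cons (by exact_mod_cast hi1)]
    have hnd1 : ¬((cs1.drop i).length = (cs1.drop i).count '-') := fun h => by
      have := pvTrim_le_of_allDash cs1 i h; omega
    have hnd2 : ¬((cs2.drop i).length = (cs2.drop i).count '-') := fun h => by
      have := pvTrim_le_of_allDash cs2 i h; omega
    have hcast : (i : Int) + 1 = ((i + 1 : Nat) : Int) := by push_cast; ring
    have hw := pvWindow_cons cs1 cs2 i e hin hi1 hi2
    have hnd1' : ¬(cs1.length - i = List.count '-' (List.drop i cs1)) := by
      simpa [List.length_drop] using hnd1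
    have hnd2' : ¬(cs2.length - i = List.count '-' (List.drop i cs2)) := by
      simpa [List.length_drop] using hnd2
    by_cases hc : cs1[i] = cs2[i]
    · have hc' : cs1[i]?.getD '-' = cs2[i]?.getD '-' := by
        rw [List.getElem?_eq_getElem hi1, List.getElem?_eq_getElem hi2]
        simpa using hc
      have hstep : pvStepA cs1 cs2 (m, mm, 1) (i : Int) = (m + 1, mm, 1) := by
        simp only [pvStepA, pvSlice_drop]
        norm_num [hnd1', hnd2', hc']
      rw [List.foldl_cons, hstep, hcast, ih (i + 1) (m + 1) mm (by omega) (by omega)]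
      have hm : pvMat cs1 cs2 i e = pvMat cs1 cs2 (i + 1) e + 1 := by
        simp [pvMat, hw, hc]
      have hmm2 : pvMis cs1 cs2 i e = pvMis cs1 cs2 (i + 1) e := by
        simp [pvMis, hw, hc]
      rw [hm, hmm2]
      push_cast
      simp only [Prod.mk.injEq, and_true, true_and]
      omega
    · have hc' : ¬(cs1[i]?.getD '-' = cs2[i]?.getD '-') := by
        rw [List.getElem?_eq_getElem hi1, List.getElem?_eq_getElem hi2]
        simpa using hc
      have hstep : pvStepA cs1 cs2 (m, mm, 1) (i : Int) = (m, mm + 1, 1) := by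
        simp only [pvStepA, pvSlice_drop]
        norm_num [hnd1', hnd2', hc']
      rw [List.foldl_cons, hstep, hcast, ih (i + 1) m (mm + 1) (by omega) (by omega)]
      have hm : pvMat cs1 cs2 i e = pvMat cs1 cs2 (i + 1) e := by
        simp [pvMat, hw, hc]
      have hmm2 : pvMis cs1 cs2 i e = pvMis cs1 cs2 (i + 1) e + 1 := by
        simp [pvMis, hw, hc]
      rw [hm, hmm2]
      push_cast
      simp only [Prod.mk.injEq, and_true, true_and]
      omega

-- ===== VERDICT (by name: the statement is the Claim_ definition above) =====
theorem parse_msa_kmer_spec : Claim_equal_parse_msa_kmer := by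
  intro seq_1 seq_2 _ _
  unfold Spec_parse_msa_kmer parse_msa_kmer parse_msa_kmer_alt
  generalize seq_1.toList = cs1
  generalize seq_2.toList = cs2
  cases hf : (cs1.zip cs2).findIdx? (fun p => p.1 != '-' && p.2 != '-') with
  | none =>
    have hnone := List.findIdx?_eq_none_iff.mp hf
    have hidle : (PySem.List.pyRange 0 (cs1.length : Int) 1).foldl
        (pvStepA cs1 cs2) (0, 0, 0) = (0, 0, 0) := by
      apply pvRunIdle
      intro j hj
      rw [PySem.List.mem_pyRange_one] at hj
      obtain ⟨hj0, hj1⟩ := hj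
      set jn := j.toNat with hjn
      have hjcast : j = (jn : Int) := by omega
      have hjlen1 : jn < cs1.length := by omega
      rintro ⟨h1, h2⟩
      by_cases hlen2 : jn < cs2.length
      · have hz : jn < (cs1.zip cs2).length := by rw [List.length_zip]; omega
        have hzel := hnone _ (List.getElem_mem hz)
        rw [List.getElem_zip] at hzel
        simp only [Bool.and_eq_false_iff, bne_eq_false_iff_eq] at hzel
        rw [hjcast, pvGet_elem _ _ hjlen1] at h1
        rw [hjcast, pvGet_elem _ _ hlen2] at h2
        rcases hzel with h | h
        · exact h1 h
        · exact h2 h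
      · rw [hjcast] at h2
        rw [show PySem.List.pyGetD cs2 ((jn : Nat) : Int) '-' = cs2.getD jn '-' by
          simp [PySem.List.pyGetD_natCast]] at h2
        rw [List.getD_eq_default _ _ (by omega)] at h2
        exact h2 rfl
    simp only [hf, hidle]
  | some s =>
    have hf' := hf
    rw [List.findIdx?_eq_some_iff_getElem] at hf
    obtain ⟨hlt, hp, hmin⟩ := hf
    have hzlen : (cs1.zip cs2).length = min cs1.length cs2.length := List.length_zip
    have hs1l : s < cs1.length := by omega
    have hs2l : s < cs2.length := by omega
    rw [List.getElem_zip] at hp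
    simp only [Bool.and_eq_true, bne_iff_ne, ne_eq] at hp
    obtain ⟨hp1, hp2⟩ := hp
    have ht1 : pvTrimmedLen cs1 cs1.length ≤ cs1.length := pvTrim_le _ _
    have ht2 : pvTrimmedLen cs2 cs2.length ≤ cs2.length := pvTrim_le _ _
    have hst1 : s < pvTrimmedLen cs1 cs1.length := by
      by_contra hle
      rw [not_lt] at hle
      have hd := pvTrim_dash cs1 cs1.length s hle hs1l
      rw [List.getD_eq_getElem _ _ hs1l] at hd
      exact hp1 hd
    have hst2 : s < pvTrimmedLen cs2 cs2.length := by
      by_contra hle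
      rw [not_lt] at hle
      have hd := pvTrim_dash cs2 cs2.length s hle hs2l
      rw [List.getD_eq_getElem _ _ hs2l] at hd
      exact hp2 hd
    have hse : s < min (pvTrimmedLen cs1 cs1.length) (pvTrimmedLen cs2 cs2.length) := by omega
    -- reduce B's match, then split A's loop at s
    simp only []
    rw [PySem.List.pyRange_one_append 0 (s : Int) (cs1.length : Int)
        (by positivity) (by exact_mod_cast le_of_lt hs1l)]
    rw [List.foldl_append]
    have hpre : (PySem.List.pyRange 0 (s : Int) 1).foldl (pvStepA cs1 cs2) (0, 0, 0)
        = (0, 0, 0) := by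
      apply pvRunIdle
      intro j hj
      rw [PySem.List.mem_pyRange_one] at hj
      obtain ⟨hj0, hj1⟩ := hj
      set jn := j.toNat with hjn
      have hjcast : j = (jn : Int) := by omega
      have hjs : jn < s := by omega
      have hjl1 : jn < cs1.length := by omega
      have hjl2 : jn < cs2.length := by omega
      rintro ⟨h1, h2⟩
      have hnp := hmin jn hjs
      rw [List.getElem_zip] at hnp
      rw [hjcast, pvGet_elem _ _ hjl1] at h1
      rw [hjcast, pvGet_elem _ _ hjl2] at h2
      exact hnp (by simp [h1, h2])
    rw [hpre]
    have hcond1 : cs1[s]?.getD '-' ≠ '-' := by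
      rw [List.getElem?_eq_getElem hs1l]; simpa using hp1
    have hcond2 : cs2[s]?.getD '-' ≠ '-' := by
      rw [List.getElem?_eq_getElem hs2l]; simpa using hp2
    have hcons : PySem.List.pyRange (s : Int) (cs1.length : Int) 1
        = (s : Int) :: PySem.List.pyRange ((s : Int) + 1) (cs1.length : Int) 1 :=
      PySem.List.pyRange_one_cons (by exact_mod_cast hs1l)
    have hstep : pvStepA cs1 cs2 (0, 0, 0) (s : Int)
        = pvStepA cs1 cs2 (0, 0, 1) (s : Int) := by
      simp only [pvStepA]
      norm_num [hcond1, hcond2]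
    rw [hcons, List.foldl_cons, hstep, ← List.foldl_cons, ← hcons]
    rw [pvRunPhase1 cs1 cs2 (min (pvTrimmedLen cs1 cs1.length) (pvTrimmedLen cs2 cs2.length))
        rfl (min (pvTrimmedLen cs1 cs1.length) (pvTrimmedLen cs2 cs2.length) - s) s 0 0
        (by omega) rfl]
    -- assemble: match count = window length - mismatch count
    have hwl : (((cs1.zip cs2).drop s).take
        (min (pvTrimmedLen cs1 cs1.length) (pvTrimmedLen cs2 cs2.length) - s)).length
        = min (pvTrimmedLen cs1 cs1.length) (pvTrimmedLen cs2 cs2.length) - s := by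
      simp only [List.length_take, List.length_drop, hzlen]
      omega
    have hsum : pvMat cs1 cs2 s (min (pvTrimmedLen cs1 cs1.length) (pvTrimmedLen cs2 cs2.length))
        + pvMis cs1 cs2 s (min (pvTrimmedLen cs1 cs1.length) (pvTrimmedLen cs2 cs2.length))
        = min (pvTrimmedLen cs1 cs1.length) (pvTrimmedLen cs2 cs2.length) - s := by
      have h0 := List.length_eq_countP_add_countP
        (p := fun p : Char × Char => p.1 != p.2)
        (l := ((cs1.zip cs2).drop s).take
          (min (pvTrimmedLen cs1 cs1.length) (pvTrimmedLen cs2 cs2.length) - s))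
      rw [hwl] at h0
      have hpq : List.countP (fun a : Char × Char => decide ¬((a.1 != a.2) = true))
            (((cs1.zip cs2).drop s).take
              (min (pvTrimmedLen cs1 cs1.length) (pvTrimmedLen cs2 cs2.length) - s))
          = List.countP (fun p : Char × Char => p.1 == p.2)
            (((cs1.zip cs2).drop s).take
              (min (pvTrimmedLen cs1 cs1.length) (pvTrimmedLen cs2 cs2.length) - s)) :=
        List.countP_congr (fun a _ => by by_cases h : a.1 = a.2 <;> simp [h])
      simp only [pvMat, pvMis]
      omega
    dsimp only
    rw [hf']
    dsimp only
    simp only [pvMis, pvMat] at hsum ⊢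
    simp only [List.cons.injEq, zero_add, and_true, true_and]
    omega
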